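-- pv_equiv track=rewrite | github.com/tie-pilot-qxw/Sparse-VideoGen | scripts/wan/bench_wan_semantic_aware_permutation.py | parse_head_counts
-- ===== SOURCE A (Python) =====
-- from typing import Iterable, List, Optional
--
-- def parse_head_counts(raw: str, original_heads: int) -> List[int]:
--     if raw == "auto":
--         counts = []
--         value = 1
--         while value < original_heads:
--             counts.append(value)
--             value *= 2
--         if original_heads not in counts:
--             counts.append(original_heads)
--         return counts
--
--     counts = [int(item) for item in raw.split(",") if item.strip()]
--     if not counts:
--         raise ValueError("--head-counts cannot be empty")
--     return counts
-- ===== SOURCE B (Python) =====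
-- def parse_head_counts(raw, original_heads):
--     if raw == "auto":
--         n = (original_heads - 1).bit_length() if original_heads > 1 else 0
--         return [1 << i for i in range(n)] + [original_heads]
--     counts = list(map(int, filter(str.strip, raw.split(","))))
--     if not counts:
--         raise ValueError("--head-counts cannot be empty")
--     return counts
-- ===== Notes on version B (the rewrite author's own statement) =====
-- stated objective: idiomatic
-- what changed: The auto branch's while-doubling loop is replaced by a closed-form bit_length count: the powers of two below original_heads are emitted by a comprehension over range(n) and original_heads is appended unconditionally (all listed powers are strictly smaller, so the membership test of A is always true); the parse branch becomes a map/filter pipeline.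
import Mathlib
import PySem

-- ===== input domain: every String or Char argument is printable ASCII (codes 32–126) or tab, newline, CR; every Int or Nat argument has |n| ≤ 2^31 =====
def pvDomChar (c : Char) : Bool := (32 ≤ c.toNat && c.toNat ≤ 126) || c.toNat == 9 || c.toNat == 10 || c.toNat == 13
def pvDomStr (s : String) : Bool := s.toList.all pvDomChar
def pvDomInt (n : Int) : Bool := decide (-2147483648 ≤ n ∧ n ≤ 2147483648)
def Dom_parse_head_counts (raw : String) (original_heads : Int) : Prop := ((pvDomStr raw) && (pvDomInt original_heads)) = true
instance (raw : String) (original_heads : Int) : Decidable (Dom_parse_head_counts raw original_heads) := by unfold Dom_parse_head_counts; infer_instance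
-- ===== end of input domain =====

-- B replaces A's while-doubling loop by a closed-form bit_length bound (comprehension over range(n));
-- the proof shows A's membership test is vacuous since every listed power of two is < original_heads.

-- ===== PORT A =====
-- 'while value < original_heads: counts.append(value); value *= 2' — structural recursion on (oh - value).toNat;
-- the 1 ≤ value proof argument only justifies termination, it does not alter the computation.
def pvAutoLoop (oh value : Int) (hv : 1 ≤ value) (acc : List Int) : List Int :=
  if h : value < oh then pvAutoLoop oh (value * 2) (by omega) (acc ++ [value]) else acc
  termination_by (oh - value).toNat
  decreasing_by omega

def parse_head_counts (raw : String) (original_heads : Int) : List Int :=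
  if raw = "auto" then
    let counts := pvAutoLoop original_heads 1 (by omega) []
    if original_heads ∈ counts then counts else counts ++ [original_heads]
  else
    -- '[int(item) for item in raw.split(",") if item.strip()]'; int() raising ValueError (ofStr? = none)
    -- and the empty-counts 'raise' are excluded by Pre_, so the port just returns the accumulator there.
    ((PySem.Str.split? raw ",").getD []).foldl
      (fun acc item => if PySem.Str.strip item ≠ "" then acc ++ [(PySem.Int.ofStr? item).getD 0] else acc) []

-- ===== PORT B =====
def parse_head_counts_alt (raw : String) (original_heads : Int) : List Int :=
  if raw = "auto" then
    let n : Nat := if 1 < original_heads then Nat.size (original_heads - 1).toNat else 0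
    (PySem.List.pyRange 0 (n : Int) 1).map (fun i => (2 : Int) ^ i.toNat) ++ [original_heads]
  else
    (((PySem.Str.split? raw ",").getD []).filter (fun t => PySem.Str.strip t ≠ "")).map
      (fun t => (PySem.Int.ofStr? t).getD 0)

-- ===== PRECONDITION & SPEC =====
-- Pre_ excludes exactly the inputs where A raises ValueError: a non-"auto" raw whose comma items
-- (the non-blank ones) do not all parse as Python ints, or are all blank.
def Pre_parse_head_counts (raw : String) (original_heads : Int) : Prop :=
  raw = "auto" ∨
    (let items := ((PySem.Str.split? raw ",").getD []).filter (fun t => PySem.Str.strip t ≠ "")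
     items ≠ [] ∧ ∀ t ∈ items, (PySem.Int.ofStr? t).isSome = true)
instance (raw : String) (original_heads : Int) : Decidable (Pre_parse_head_counts raw original_heads) := by
  unfold Pre_parse_head_counts; infer_instance

def pvWitness_parse_head_counts : String × Int := ("auto", 12)

def Spec_parse_head_counts (raw : String) (original_heads : Int) (out : List Int) : Prop := out = parse_head_counts_alt raw original_heads
instance (raw : String) (original_heads : Int) (out : List Int) : Decidable (Spec_parse_head_counts raw original_heads out) := by unfold Spec_parse_head_counts; infer_instance

-- ===== CLAIM (what is proved, stated in full; the proofs are below) =====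
def Claim_equal_parse_head_counts : Prop := ∀ (raw : String) (original_heads : Int), Dom_parse_head_counts raw original_heads → Pre_parse_head_counts raw original_heads → Spec_parse_head_counts raw original_heads (parse_head_counts raw original_heads)

-- ===== LEMMAS AND PROOFS =====

-- characterisation of the bit_length bound: 2^i < oh ↔ i < n
lemma pv_pow_lt_iff (oh : Int) (n : Nat)
    (hn : n = if 1 < oh then Nat.size (oh - 1).toNat else 0) :
    ∀ i : Nat, ((2 : Int) ^ i < oh ↔ i < n) := by
  intro i
  by_cases h1 : 1 < oh
  · simp only [hn, if_pos h1]
    rw [Nat.lt_size]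
    have h2 : ((2 : Int) ^ i < oh) ↔ ((2 : Nat) ^ i ≤ (oh - 1).toNat) := by
      rw [← Nat.cast_le (α := Int)]
      push_cast
      omega
    rw [h2]
  · simp only [hn, if_neg h1]
    have : (1 : Int) ≤ 2 ^ i := one_le_pow₀ (by norm_num)
    constructor
    · intro h; omega
    · omega

-- the doubling loop, started at 2^k, appends exactly the powers 2^k … 2^(n-1)
lemma pv_autoLoop_eq (oh : Int) (n : Nat)
    (hiff : ∀ i : Nat, ((2 : Int) ^ i < oh ↔ i < n)) :
    ∀ (k : Nat) (acc : List Int) (hv : 1 ≤ (2 : Int) ^ k),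
      pvAutoLoop oh ((2 : Int) ^ k) hv acc
        = acc ++ ((List.range n).drop k).map (fun i => (2 : Int) ^ i) := by
  intro k
  induction' hm : n - k using Nat.strong_induction_on with m ih generalizing k
  intro acc hv
  rw [pvAutoLoop]
  by_cases h : (2 : Int) ^ k < oh
  · have hk : k < n := (hiff k).mp h
    have hpow : (2 : Int) ^ k * 2 = 2 ^ (k + 1) := by ring
    rw [dif_pos h]
    have := ih (n - (k + 1)) (by omega) (k + 1) rfl
    simp only [hpow] at *
    rw [this (acc ++ [(2:Int)^k]) (one_le_pow₀ (by norm_num))]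
    have hdrop : (List.range n).drop k = k :: (List.range n).drop (k + 1) := by
      rw [List.drop_eq_getElem_cons (by simpa using hk)]
      simp
    rw [hdrop]
    simp
  · have hk : ¬ k < n := fun hlt => h ((hiff k).mpr hlt)
    rw [dif_neg h, List.drop_eq_nil_of_le (by simpa using hk)]
    simp

lemma pv_auto_case (oh : Int) :
    parse_head_counts "auto" oh = parse_head_counts_alt "auto" oh := by
  unfold parse_head_counts parse_head_counts_alt
  simp only [reduceIte]
  set n : Nat := if 1 < oh then Nat.size (oh - 1).toNat else 0 with hn
  have hiff := pv_pow_lt_iff oh n hn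
  have hloop := pv_autoLoop_eq oh n hiff 0 [] (by norm_num)
  simp only [pow_zero, List.drop_zero, List.nil_append] at hloop
  have hcounts : pvAutoLoop oh 1 (by omega) [] = (List.range n).map (fun i => (2 : Int) ^ i) :=
    hloop
  rw [hcounts]
  have hmem : oh ∉ (List.range n).map (fun i => (2 : Int) ^ i) := by
    intro hm
    obtain ⟨i, hi, he⟩ := List.mem_map.mp hm
    exact absurd (he ▸ (hiff i).mpr (List.mem_range.mp hi)) (lt_irrefl oh)
  rw [if_neg hmem]
  have hrange : PySem.List.pyRange 0 (n : Int) 1 = (List.range n).map (Int.ofNat ·) := by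
    rw [PySem.List.pyRange_one]
    simp
  rw [hrange, List.map_map]
  congr 1

lemma pv_parse_case (raw : String) (oh : Int) (h : raw ≠ "auto") :
    parse_head_counts raw oh = parse_head_counts_alt raw oh := by
  unfold parse_head_counts parse_head_counts_alt
  rw [if_neg h, if_neg h]
  simpa using PySem.List.foldl_append_if (fun t => PySem.Str.strip t ≠ "")
    (fun t => (PySem.Int.ofStr? t).getD 0) ((PySem.Str.split? raw ",").getD []) []

-- ===== VERDICT (by name: the statement is the Claim_ definition above) =====
theorem parse_head_counts_spec : Claim_equal_parse_head_counts := by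
  intro raw oh _ _
  unfold Spec_parse_head_counts
  by_cases h : raw = "auto"
  · subst h; exact pv_auto_case oh
  · exact pv_parse_case raw oh h
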